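-- pv_equiv track=rewrite | github.com/rrkas/dsa-practice-2026 | platforms/hacker-rank/M--40--larrys-array/solutions/solution.py | larrysArray
-- ===== SOURCE A (Python) =====
-- def larrysArray(A):
--     inv = 0
--
--     n = len(A)
--     for i in range(n - 1):
--         for j in range(i + 1, n):
--             if A[i] > A[j]:
--                 inv += 1
--
--     return "YES" if inv % 2 == 0 else "NO"
-- ===== SOURCE B (Python) =====
-- def larrysArray(A):
--     def msort(xs):
--         if len(xs) < 2:
--             return xs, 0
--         m = len(xs) // 2
--         left, c1 = msort(xs[:m])
--         right, c2 = msort(xs[m:])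
--         merged = []
--         inv = 0
--         i = j = 0
--         while i < len(left) and j < len(right):
--             if left[i] <= right[j]:
--                 merged.append(left[i]); i += 1
--             else:
--                 inv += len(left) - i
--                 merged.append(right[j]); j += 1
--         merged.extend(left[i:])
--         merged.extend(right[j:])
--         return merged, c1 + c2 + inv
--     _, inv = msort(A)
--     return "YES" if inv % 2 == 0 else "NO"
-- ===== Notes on version B (the rewrite author's own statement) =====
-- stated objective: faster
-- what changed: Replaced the quadratic double-loop inversion count by a merge-sort that counts inversions while merging, deciding the same parity.
import Mathlib
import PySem

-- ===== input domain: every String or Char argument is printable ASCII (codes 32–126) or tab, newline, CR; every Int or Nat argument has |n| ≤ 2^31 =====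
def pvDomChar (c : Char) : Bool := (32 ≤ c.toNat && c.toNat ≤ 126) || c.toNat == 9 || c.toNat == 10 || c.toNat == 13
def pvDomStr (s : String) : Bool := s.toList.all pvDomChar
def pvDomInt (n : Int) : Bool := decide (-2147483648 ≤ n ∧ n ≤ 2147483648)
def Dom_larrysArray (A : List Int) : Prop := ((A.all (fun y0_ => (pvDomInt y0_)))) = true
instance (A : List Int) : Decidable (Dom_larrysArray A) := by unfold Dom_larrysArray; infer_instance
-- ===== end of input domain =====

-- B replaces A's quadratic double-loop inversion count by a merge sort counting inversions (faster).

-- ===== PORT A =====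
def larrysArray (A : List Int) : String :=
  let n : Int := A.length
  let inv : Int :=
    (PySem.List.pyRange 0 (n - 1) 1).foldl (fun inv i =>
      (PySem.List.pyRange (i + 1) n 1).foldl (fun inv j =>
        if PySem.List.pyGetD A j 0 < PySem.List.pyGetD A i 0 then inv + 1 else inv) inv) 0
  if PySem.Int.mod inv 2 = 0 then "YES" else "NO"

-- ===== PORT B =====
-- merge two runs, counting cross inversions (the while loop of Source B as structural recursion)
def mergeCount : List Int → List Int → List Int × Int
  | [], r => (r, 0)
  | l, [] => (l, 0)
  | x :: l, y :: r =>
    if x ≤ y then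
      let p := mergeCount l (y :: r)
      (x :: p.1, p.2)
    else
      let p := mergeCount (x :: l) r
      (y :: p.1, p.2 + ((x :: l).length : Int))

def msortCount (xs : List Int) : List Int × Int :=
  if xs.length < 2 then (xs, 0)
  else
    let m := xs.length / 2
    let p1 := msortCount (xs.take m)
    let p2 := msortCount (xs.drop m)
    let p := mergeCount p1.1 p2.1
    (p.1, p1.2 + p2.2 + p.2)
termination_by xs.length
decreasing_by
  · simp [List.length_take]; omega
  · simp; omega

def larrysArray_alt (A : List Int) : String :=
  if PySem.Int.mod (msortCount A).2 2 = 0 then "YES" else "NO"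

-- ===== PRECONDITION & SPEC =====
def Spec_larrysArray (A : List Int) (out : String) : Prop := out = larrysArray_alt A
instance (A : List Int) (out : String) : Decidable (Spec_larrysArray A out) := by unfold Spec_larrysArray; infer_instance

-- ===== CLAIM (what is proved, stated in full; the proofs are below) =====
def Claim_equal_larrysArray : Prop := ∀ (A : List Int), Dom_larrysArray A → Spec_larrysArray A (larrysArray A)

-- ===== LEMMAS AND PROOFS =====

-- reference inversion count: pairs i < j with A[i] > A[j]
def invNaive : List Int → Int
  | [] => 0
  | x :: xs => (xs.countP (fun y => decide (y < x)) : Int) + invNaive xs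

-- cross inversions between two lists
def cross (l r : List Int) : Int :=
  (l.map (fun x => (r.countP (fun y => decide (y < x)) : Int))).sum

theorem invNaive_short (xs : List Int) (h : xs.length < 2) : invNaive xs = 0 := by
  match xs, h with
  | [], _ => rfl
  | [x], _ => simp [invNaive]

theorem cross_nil_left (r : List Int) : cross [] r = 0 := rfl

theorem cross_nil_right (l : List Int) : cross l [] = 0 := by
  induction l with
  | nil => rfl
  | cons x l ih => simpa [cross] using ih

theorem cross_cons_left (x : Int) (l r : List Int) :
    cross (x :: l) r = (r.countP (fun y => decide (y < x)) : Int) + cross l r := by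
  simp [cross]

theorem cross_cons_right (l : List Int) (y : Int) (r : List Int) :
    cross l (y :: r) = (l.countP (fun z => decide (y < z)) : Int) + cross l r := by
  induction l with
  | nil => simp [cross]
  | cons z l ih =>
    rw [cross_cons_left, cross_cons_left, ih, List.countP_cons]
    by_cases h : y < z <;> simp [h] <;> push_cast <;> try ring

theorem invNaive_append (l r : List Int) :
    invNaive (l ++ r) = invNaive l + cross l r + invNaive r := by
  induction l with
  | nil => simp [invNaive, cross_nil_left]
  | cons x l ih =>
    simp only [List.cons_append, invNaive, ih, cross_cons_left, List.countP_append]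
    push_cast
    ring

theorem cross_perm_left {l l' : List Int} (h : l.Perm l') (r : List Int) :
    cross l r = cross l' r := by
  unfold cross
  exact (h.map _).sum_eq

theorem cross_perm_right (l : List Int) {r r' : List Int} (h : r.Perm r') :
    cross l r = cross l r' := by
  unfold cross
  simp [h.countP_eq]

theorem mergeCount_perm (l r : List Int) : (mergeCount l r).1.Perm (l ++ r) := by
  fun_induction mergeCount with
  | case1 r => simp
  | case2 l h => simp
  | case3 x l y r hle p ih => exact ih.cons x
  | case4 x l y r hle p ih => exact (ih.cons y).trans List.perm_middle.symm

theorem mergeCount_sorted (l r : List Int) (hl : l.Pairwise (· ≤ ·)) (hr : r.Pairwise (· ≤ ·)) :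
    (mergeCount l r).1.Pairwise (· ≤ ·) := by
  revert hl hr
  fun_induction mergeCount with
  | case1 r => intro _ hr; exact hr
  | case2 l h => intro hl _; exact hl
  | case3 x l y r hle p ih =>
    intro hl hr
    obtain ⟨hx, hl'⟩ := List.pairwise_cons.1 hl
    refine List.pairwise_cons.2 ⟨?_, ih hl' hr⟩
    intro z hz
    have hz' := (mergeCount_perm l (y :: r)).mem_iff.1 hz
    rcases List.mem_append.1 hz' with h1 | h1
    · exact hx z h1
    · rcases List.mem_cons.1 h1 with rfl | h2
      · exact hle
      · exact le_trans hle ((List.pairwise_cons.1 hr).1 z h2)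
  | case4 x l y r hle p ih =>
    intro hl hr
    obtain ⟨hy, hr'⟩ := List.pairwise_cons.1 hr
    refine List.pairwise_cons.2 ⟨?_, ih hl hr'⟩
    intro z hz
    have hz' := (mergeCount_perm (x :: l) r).mem_iff.1 hz
    have hyx : y ≤ x := le_of_lt (lt_of_not_ge hle)
    rcases List.mem_append.1 hz' with h1 | h1
    · rcases List.mem_cons.1 h1 with rfl | h2
      · exact hyx
      · exact le_trans hyx ((List.pairwise_cons.1 hl).1 z h2)
    · exact hy z h1

theorem mergeCount_count (l r : List Int) (hl : l.Pairwise (· ≤ ·)) (hr : r.Pairwise (· ≤ ·)) :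
    (mergeCount l r).2 = cross l r := by
  revert hl hr
  fun_induction mergeCount with
  | case1 r => intro _ _; simp [cross]
  | case2 l h => intro _ _; simp [cross_nil_right]
  | case3 x l y r hle p ih =>
    intro hl hr
    obtain ⟨hx, hl'⟩ := List.pairwise_cons.1 hl
    have hz : (y :: r).countP (fun z => decide (z < x)) = 0 := by
      refine List.countP_eq_zero.2 ?_
      intro z hz
      rcases List.mem_cons.1 hz with rfl | h2
      · simp; exact hle
      · simp; exact le_trans hle ((List.pairwise_cons.1 hr).1 z h2)
    simp only [cross_cons_left, hz]
    rw [ih hl' hr]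
    simp
  | case4 x l y r hle p ih =>
    intro hl hr
    obtain ⟨hy, hr'⟩ := List.pairwise_cons.1 hr
    have hyx : y < x := lt_of_not_ge hle
    have hz : (x :: l).countP (fun z => decide (y < z)) = (x :: l).length := by
      refine List.countP_eq_length.2 ?_
      intro z hz
      rcases List.mem_cons.1 hz with rfl | h2
      · simp; exact hyx
      · simp; exact lt_of_lt_of_le hyx ((List.pairwise_cons.1 hl).1 z h2)
    rw [cross_cons_right, hz, ih hl hr']
    push_cast
    ring

theorem msortCount_eq (xs : List Int) (h : ¬ xs.length < 2) :
    msortCount xs =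
      ((mergeCount (msortCount (xs.take (xs.length / 2))).1 (msortCount (xs.drop (xs.length / 2))).1).1,
       (msortCount (xs.take (xs.length / 2))).2 + (msortCount (xs.drop (xs.length / 2))).2 +
       (mergeCount (msortCount (xs.take (xs.length / 2))).1 (msortCount (xs.drop (xs.length / 2))).1).2) := by
  rw [msortCount]
  simp [h]

theorem msortCount_spec (xs : List Int) :
    (msortCount xs).1.Perm xs ∧ (msortCount xs).1.Pairwise (· ≤ ·) ∧ (msortCount xs).2 = invNaive xs := by
  induction xs using msortCount.induct with
  | case1 xs h =>
    rw [msortCount, if_pos h]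
    refine ⟨List.Perm.refl _, ?_, (invNaive_short xs h).symm⟩
    match xs, h with
    | [], _ => simp
    | [x], _ => simp
  | case2 xs h m ih1 ih2 =>
    have hm : m = xs.length / 2 := rfl
    rw [hm] at ih1 ih2
    obtain ⟨hperm1, hsort1, hinv1⟩ := ih1
    obtain ⟨hperm2, hsort2, hinv2⟩ := ih2
    rw [msortCount_eq xs h]
    refine ⟨?_, mergeCount_sorted _ _ hsort1 hsort2, ?_⟩
    · exact (mergeCount_perm _ _).trans ((hperm1.append hperm2).trans
        (by rw [List.take_append_drop]))
    · rw [mergeCount_count _ _ hsort1 hsort2, cross_perm_left hperm1, cross_perm_right _ hperm2,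
          hinv1, hinv2]
      conv_rhs => rw [← List.take_append_drop (xs.length / 2) xs, invNaive_append]
      ring

-- the inner loop of A counts the elements after position i that are smaller than A[i]
theorem inner_fold (A : List Int) (i : Int) (h0 : 0 ≤ i) (acc : Int) :
    (PySem.List.pyRange (i + 1) (A.length : Int) 1).foldl (fun inv j =>
      if PySem.List.pyGetD A j 0 < PySem.List.pyGetD A i 0 then inv + 1 else inv) acc
    = acc + ((A.drop (i + 1).toNat).countP (fun y => decide (y < PySem.List.pyGetD A i 0)) : Int) := by
  rw [PySem.List.foldl_pyRange_pyGetD' A 0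
    (fun inv y => if y < PySem.List.pyGetD A i 0 then inv + 1 else inv) acc (by omega)]
  exact PySem.List.foldl_ite_add_one _ _ _

-- the outer loop from index k accumulates the inversions of the suffix A.drop k
theorem outer_fold (A : List Int) (k : Nat) (acc : Int) :
    (PySem.List.pyRange (k : Int) ((A.length : Int) - 1) 1).foldl (fun inv i =>
      (PySem.List.pyRange (i + 1) (A.length : Int) 1).foldl (fun inv j =>
        if PySem.List.pyGetD A j 0 < PySem.List.pyGetD A i 0 then inv + 1 else inv) inv) acc
    = acc + invNaive (A.drop k) := by
  by_cases hk : (A.length : Int) - 1 ≤ (k : Int)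
  · rw [PySem.List.pyRange_one_eq_nil hk, List.foldl_nil,
      invNaive_short (A.drop k) (by simp; omega)]
    ring
  · have hk' : (k : Int) < (A.length : Int) - 1 := lt_of_not_ge hk
    have hklen : k < A.length := by omega
    rw [PySem.List.pyRange_one_cons hk', List.foldl_cons, inner_fold A (k : Int) (by omega) acc]
    have hcast : ((k : Int) + 1) = (((k + 1 : Nat)) : Int) := by push_cast; ring
    rw [hcast, outer_fold A (k + 1)]
    have ht : (((k + 1 : Nat)) : Int).toNat = k + 1 := by omega
    have hdrop : A.drop k = A[k] :: A.drop (k + 1) := List.drop_eq_getElem_cons hklen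
    rw [ht, hdrop]
    simp only [invNaive, PySem.List.pyGetD_natCast, List.getD_eq_getElem _ _ hklen]
    ring
termination_by A.length - k
decreasing_by omega

-- A's double loop computes invNaive
theorem larrysArray_inv (A : List Int) :
    (PySem.List.pyRange 0 ((A.length : Int) - 1) 1).foldl (fun inv i =>
      (PySem.List.pyRange (i + 1) (A.length : Int) 1).foldl (fun inv j =>
        if PySem.List.pyGetD A j 0 < PySem.List.pyGetD A i 0 then inv + 1 else inv) inv) 0
    = invNaive A := by
  have h := outer_fold A 0 0
  simpa using h

-- ===== VERDICT (by name: the statement is the Claim_ definition above) =====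
theorem larrysArray_spec : Claim_equal_larrysArray := by
  intro A _
  show larrysArray A = larrysArray_alt A
  unfold larrysArray larrysArray_alt
  show (if PySem.Int.mod
      ((PySem.List.pyRange 0 ((A.length : Int) - 1) 1).foldl (fun inv i =>
        (PySem.List.pyRange (i + 1) (A.length : Int) 1).foldl (fun inv j =>
          if PySem.List.pyGetD A j 0 < PySem.List.pyGetD A i 0 then inv + 1 else inv) inv) 0)
      2 = 0 then "YES" else "NO") = _
  rw [larrysArray_inv, (msortCount_spec A).2.2]
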